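-- pv_equiv track=rewrite | github.com/iduxon/read-alignment-problems | approximate-matching.py | naive_hamming
-- ===== SOURCE A (Python) =====
-- def naive_hamming(p, t, max_distance):
--     occurences = []
--     for i in range(len(t) - len(p) + 1):
--         missmatches = 0
--         for j in range(len(p)):
--             if p[j] != t[i + j]:
--                 missmatches += 1
--                 if missmatches > max_distance:
--                     break
--         if missmatches <= max_distance:
--             occurences.append(i)
--     return occurences
-- ===== SOURCE B (Python) =====
-- def naive_hamming(p, t, max_distance):
--     n = len(t) - len(p) + 1
--     counts = [0] * n
--     for j in range(len(p)):
--         counts = [c + (1 if p[j] != t[i + j] else 0) for i, c in enumerate(counts)]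
--     return [i for i, c in enumerate(counts) if c <= max_distance]
-- ===== Notes on version B (the rewrite author's own statement) =====
-- stated objective: alternative
-- what changed: Replaces the row-wise scan with early-exit mismatch counting by a column-wise algorithm that maintains a per-window mismatch-count vector (one pass over the pattern, rebuilding the counts list each step) and filters the windows at the end.
import Mathlib
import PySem

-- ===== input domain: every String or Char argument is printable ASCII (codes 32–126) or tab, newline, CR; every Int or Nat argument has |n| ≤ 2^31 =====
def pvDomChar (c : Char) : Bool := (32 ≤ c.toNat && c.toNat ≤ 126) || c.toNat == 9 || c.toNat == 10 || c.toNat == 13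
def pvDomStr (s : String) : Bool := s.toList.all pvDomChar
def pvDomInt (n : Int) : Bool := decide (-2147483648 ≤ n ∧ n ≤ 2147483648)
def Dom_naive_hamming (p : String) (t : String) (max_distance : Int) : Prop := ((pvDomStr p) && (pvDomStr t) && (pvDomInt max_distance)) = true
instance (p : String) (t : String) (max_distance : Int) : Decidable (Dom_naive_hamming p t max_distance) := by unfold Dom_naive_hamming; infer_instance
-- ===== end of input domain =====

-- B replaces A's row-wise scan with early exit by a column-wise per-window mismatch-count vector; alternative decomposition, same cost.


-- ===== PORT A =====
-- inner 'for j in range(len(p))' loop with its break; m is 'missmatches'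
def pvInnerA (pl tl : List Char) (i md : Int) : List Int → Int → Int
  | [], m => m
  | j :: js, m =>
    if PySem.List.pyGet? pl j ≠ PySem.List.pyGet? tl (i + j) then
      if m + 1 > md then m + 1 else pvInnerA pl tl i md js (m + 1)
    else pvInnerA pl tl i md js m

def naive_hamming (p : String) (t : String) (max_distance : Int) : List Int :=
  let pl := p.toList
  let tl := t.toList
  (PySem.List.pyRange 0 ((tl.length : Int) - (pl.length : Int) + 1) 1).foldl
    (fun occurences i =>
      let missmatches := pvInnerA pl tl i max_distance (PySem.List.pyRange 0 (pl.length : Int) 1) 0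
      if missmatches ≤ max_distance then occurences ++ [i] else occurences)
    []

-- ===== PORT B =====
-- one column step: counts = [c + (1 if p[j] != t[i+j] else 0) for i, c in enumerate(counts)]
def pvStepB (pl tl : List Char) (j : Int) (counts : List Int) : List Int :=
  (PySem.List.enumerate counts).map
    (fun ic => ic.2 + if PySem.List.pyGet? pl j ≠ PySem.List.pyGet? tl (ic.1 + j) then 1 else 0)

def naive_hamming_alt (p : String) (t : String) (max_distance : Int) : List Int :=
  let pl := p.toList
  let tl := t.toList
  let counts :=
    (PySem.List.pyRange 0 (pl.length : Int) 1).foldl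
      (fun counts j => pvStepB pl tl j counts)
      (PySem.List.pyRepeat [(0 : Int)] ((tl.length : Int) - (pl.length : Int) + 1))
  ((PySem.List.enumerate counts).filter (fun ic => ic.2 ≤ max_distance)).map (·.1)

-- ===== PRECONDITION & SPEC =====
def Spec_naive_hamming (p : String) (t : String) (max_distance : Int) (out : List Int) : Prop := out = naive_hamming_alt p t max_distance
instance (p : String) (t : String) (max_distance : Int) (out : List Int) : Decidable (Spec_naive_hamming p t max_distance out) := by unfold Spec_naive_hamming; infer_instance

-- ===== CLAIM (what is proved, stated in full; the proofs are below) =====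
def Claim_equal_naive_hamming : Prop := ∀ (p : String) (t : String) (max_distance : Int), Dom_naive_hamming p t max_distance → Spec_naive_hamming p t max_distance (naive_hamming p t max_distance)

-- ===== LEMMAS AND PROOFS =====

-- mismatch count of window i over the pattern positions js
def pvCnt (pl tl : List Char) (i : Int) (js : List Int) : Int :=
  (js.countP (fun j => decide (PySem.List.pyGet? pl j ≠ PySem.List.pyGet? tl (i + j))) : Int)

theorem pvCnt_nil (pl tl : List Char) (i : Int) : pvCnt pl tl i [] = 0 := rfl

theorem pvCnt_cons (pl tl : List Char) (i j : Int) (js : List Int) :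
    pvCnt pl tl i (j :: js) =
      (if PySem.List.pyGet? pl j ≠ PySem.List.pyGet? tl (i + j) then 1 else 0) + pvCnt pl tl i js := by
  simp [pvCnt, List.countP_cons]
  split_ifs <;> simp [add_comm]

theorem pvCnt_nonneg (pl tl : List Char) (i : Int) (js : List Int) : 0 ≤ pvCnt pl tl i js :=
  Int.natCast_nonneg _

-- A's inner loop with break decides exactly 'full mismatch count ≤ md'
theorem pvInnerA_le_iff (pl tl : List Char) (i md : Int) (js : List Int) (m : Int) :
    pvInnerA pl tl i md js m ≤ md ↔ m + pvCnt pl tl i js ≤ md := by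
  induction js generalizing m with
  | nil => simp [pvInnerA, pvCnt_nil]
  | cons j js ih =>
    rw [pvCnt_cons]
    simp only [pvInnerA]
    split_ifs with h hb
    · constructor
      · intro hle; omega
      · intro hle; have := pvCnt_nonneg pl tl i js; omega
    · rw [ih]; constructor <;> intro <;> omega
    · rw [ih]; constructor <;> intro <;> omega

-- enumerate of a map over a range pairs each index with its value
theorem pvEnumerate_map_pyRange (g : Int → Int) (s n : Int) :
    PySem.List.enumerate ((PySem.List.pyRange s n 1).map g) s =
      (PySem.List.pyRange s n 1).map (fun i => (i, g i)) := by
  by_cases h : n ≤ s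
  · rw [PySem.List.pyRange_one_eq_nil h]; rfl
  · rw [not_le] at h
    have hk : ((n - (s+1)).toNat) < ((n - s).toNat) := by omega
    rw [PySem.List.pyRange_one_cons h]
    simp only [List.map_cons, PySem.List.enumerate_cons]
    rw [pvEnumerate_map_pyRange g (s+1) n]
termination_by (n - s).toNat
decreasing_by omega

-- one column step acting on counts in 'map over range' form
theorem pvStepB_map (pl tl : List Char) (j n : Int) (g : Int → Int) :
    pvStepB pl tl j ((PySem.List.pyRange 0 n 1).map g) =
      (PySem.List.pyRange 0 n 1).map
        (fun i => g i + if PySem.List.pyGet? pl j ≠ PySem.List.pyGet? tl (i + j) then 1 else 0) := by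
  unfold pvStepB
  rw [pvEnumerate_map_pyRange g 0 n, List.map_map]
  rfl

-- fold of all column steps: counts i = g i + mismatch count of window i
theorem pvFoldB (pl tl : List Char) (n : Int) (js : List Int) (g : Int → Int) :
    js.foldl (fun counts j => pvStepB pl tl j counts) ((PySem.List.pyRange 0 n 1).map g) =
      (PySem.List.pyRange 0 n 1).map (fun i => g i + pvCnt pl tl i js) := by
  induction js generalizing g with
  | nil => simp [pvCnt_nil]
  | cons j js ih =>
    simp only [List.foldl_cons]
    rw [pvStepB_map, ih]
    apply List.map_congr_left
    intro i _
    rw [pvCnt_cons]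
    ring_nf

theorem pvRepeat_zero_eq_map (n : Int) :
    PySem.List.pyRepeat [(0 : Int)] n = (PySem.List.pyRange 0 n 1).map (fun _ => (0 : Int)) := by
  rw [PySem.List.pyRepeat_singleton, PySem.List.pyRange_one, List.map_map]
  simp only [Function.comp_def]
  rw [List.map_const', List.length_range]
  norm_num

-- the two folds compute the same list (stated without the ports' lets so rw applies)
theorem pvMain (pl tl : List Char) (md : Int) :
    (PySem.List.pyRange 0 ((tl.length : Int) - (pl.length : Int) + 1) 1).foldl
      (fun occurences i =>
        let missmatches := pvInnerA pl tl i md (PySem.List.pyRange 0 (pl.length : Int) 1) 0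
        if missmatches ≤ md then occurences ++ [i] else occurences) []
    = ((PySem.List.enumerate
          ((PySem.List.pyRange 0 (pl.length : Int) 1).foldl
            (fun counts j => pvStepB pl tl j counts)
            (PySem.List.pyRepeat [(0 : Int)] ((tl.length : Int) - (pl.length : Int) + 1)))).filter
        (fun ic => ic.2 ≤ md)).map (·.1) := by
  rw [pvRepeat_zero_eq_map, pvFoldB, pvEnumerate_map_pyRange, List.filter_map, List.map_map]
  rw [show (fun (occurences : List Int) (i : Int) =>
        let missmatches := pvInnerA pl tl i md (PySem.List.pyRange 0 (pl.length : Int) 1) 0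
        if missmatches ≤ md then occurences ++ [i] else occurences)
      = fun occurences i =>
          if pvInnerA pl tl i md (PySem.List.pyRange 0 (pl.length : Int) 1) 0 ≤ md
          then occurences ++ [i] else occurences from rfl]
  rw [PySem.List.foldl_append_ite_eq_filter]
  simp only [List.nil_append, Function.comp_def, zero_add, List.map_id']
  apply List.filter_congr
  intro i _
  simp only [decide_eq_decide]
  rw [pvInnerA_le_iff]
  omega

-- ===== VERDICT (by name: the statement is the Claim_ definition above) =====
theorem naive_hamming_spec : Claim_equal_naive_hamming := by
  intro p t md _
  exact pvMain p.toList t.toList md
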